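-- pv_equiv track=rewrite | github.com/vhsw/Advent-of-Code | 2019/Day 22/slam_shuffle.py | weird_math_shuffle
-- ===== SOURCE A (Python) =====
-- def weird_math_shuffle(commands, MOD=119315717514047):
--     offset = 0
--     increment = 1
--     for command in commands:
--         if command == "deal into new stack":
--             increment = -increment
--             increment %= MOD
--             offset += increment
--             offset %= MOD
--         elif command.startswith("cut"):
--             n = int(command[4:])
--             offset += increment * n
--             offset %= MOD
--         elif command.startswith("deal with increment"):
--             n = int(command[20:])
--             increment *= pow(n, MOD - 2, MOD)
--             increment %= MOD
--     return offset, increment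
-- ===== SOURCE B (Python) =====
-- def weird_math_shuffle(commands, MOD=119315717514047):
--     def parse(command):
--         if command == "deal into new stack":
--             return (-1, -1)
--         if command.startswith("cut"):
--             return (int(command[4:]), 1)
--         if command.startswith("deal with increment"):
--             return (0, pow(int(command[20:]), MOD - 2, MOD))
--         return (0, 1)
--
--     def solve(cmds):
--         # affine pair (shift, factor) for this block of commands, by halving
--         if not cmds:
--             return (0, 1)
--         if len(cmds) == 1:
--             return parse(cmds[0])
--         mid = len(cmds) // 2
--         c1, m1 = solve(cmds[:mid])
--         c2, m2 = solve(cmds[mid:])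
--         return ((c1 + m1 * c2) % MOD, (m1 * m2) % MOD)
--
--     c, m = solve(commands)
--     return c % MOD, m % MOD
-- ===== Notes on version B (the rewrite author's own statement) =====
-- stated objective: alternative
-- what changed: A's branch-per-command mutating loop is replaced by a divide-and-conquer recursion: each command is parsed into an affine pair and the list is solved by recursively halving it and composing the two halves' affine pairs (correct because affine composition mod MOD is associative).
-- outside the precondition, e.g. on weird_math_shuffle([], 0): A returns (0, 1), B raises ZeroDivisionError; on weird_math_shuffle(['cut 3'], 1): A returns (0, 1), B returns (0, 0); on weird_math_shuffle(['cut 3'], -5): A returns (-2, 1), B returns (-2, -4)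
import Mathlib
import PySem

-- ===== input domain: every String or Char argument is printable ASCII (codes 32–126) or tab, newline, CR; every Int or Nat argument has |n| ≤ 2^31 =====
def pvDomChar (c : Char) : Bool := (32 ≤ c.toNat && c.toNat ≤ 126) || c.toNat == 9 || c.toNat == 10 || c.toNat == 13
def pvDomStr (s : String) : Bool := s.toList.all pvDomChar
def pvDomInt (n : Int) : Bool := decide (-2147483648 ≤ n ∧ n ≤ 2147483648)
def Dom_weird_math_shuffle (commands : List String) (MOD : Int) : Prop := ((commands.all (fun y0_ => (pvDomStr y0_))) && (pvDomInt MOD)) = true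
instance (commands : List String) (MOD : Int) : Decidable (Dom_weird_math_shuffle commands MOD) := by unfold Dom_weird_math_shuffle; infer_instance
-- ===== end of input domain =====

-- B replaces A's branch-per-command mutating loop by a divide-and-conquer recursion on halves of the
-- command list, composing the halves' affine pairs (objective: alternative, same cost).

-- ===== PORT A =====
-- one loop iteration of A: branch per command shape, updating (offset, increment) in place
def wmsStepA (MOD : Int) (s : Int × Int) (command : String) : Int × Int :=
  if command == "deal into new stack" then
    let inc := PySem.Int.mod (-s.2) MOD
    (PySem.Int.mod (s.1 + inc) MOD, inc)
  else if PySem.Str.startswith command "cut" then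
    match PySem.Int.ofStr? (PySem.Str.slice command (some 4) none) with
    | some n => (PySem.Int.mod (s.1 + s.2 * n) MOD, s.2)
    | none => s  -- Python raises ValueError here; excluded by Pre_
  else if PySem.Str.startswith command "deal with increment" then
    match PySem.Int.ofStr? (PySem.Str.slice command (some 20) none) with
    | some n => (s.1, PySem.Int.mod (s.2 * PySem.Int.powMod n (MOD - 2).toNat MOD) MOD)
    | none => s  -- Python raises ValueError here; excluded by Pre_
  else s

def weird_math_shuffle (commands : List String) (MOD : Int) : Int × Int :=
  commands.foldl (wmsStepA MOD) (0, 1)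

-- ===== PORT B =====
-- parse a command into its affine pair (c, m): the command acts on state (o, i) as o += i*c; i *= m
def wmsParse (MOD : Int) (command : String) : Int × Int :=
  if command == "deal into new stack" then (-1, -1)
  else if PySem.Str.startswith command "cut" then
    match PySem.Int.ofStr? (PySem.Str.slice command (some 4) none) with
    | some n => (n, 1)
    | none => (0, 1)  -- Python raises ValueError here; excluded by Pre_
  else if PySem.Str.startswith command "deal with increment" then
    match PySem.Int.ofStr? (PySem.Str.slice command (some 20) none) with
    | some n => (0, PySem.Int.powMod n (MOD - 2).toNat MOD)
    | none => (0, 1)  -- Python raises ValueError here; excluded by Pre_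
  else (0, 1)

-- composition of two affine pairs, reduced mod MOD
def wmsComb (MOD : Int) (p q : Int × Int) : Int × Int :=
  (PySem.Int.mod (p.1 + p.2 * q.1) MOD, PySem.Int.mod (p.2 * q.2) MOD)

-- divide and conquer: the affine pair of a block of commands, by halving the block;
-- structural recursion on a length fuel (pure totality device: with fuel ≥ length the
-- fuel-exhausted branch is never reached)
def wmsSolveFuel (MOD : Int) : Nat → List String → Int × Int
  | _, [] => (0, 1)
  | _, [c] => wmsParse MOD c
  | 0, _ :: _ :: _ => (0, 1)
  | fuel + 1, a :: b :: t =>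
    wmsComb MOD (wmsSolveFuel MOD fuel ((a :: b :: t).take ((a :: b :: t).length / 2)))
      (wmsSolveFuel MOD fuel ((a :: b :: t).drop ((a :: b :: t).length / 2)))

def wmsSolve (MOD : Int) (cmds : List String) : Int × Int :=
  wmsSolveFuel MOD cmds.length cmds

def weird_math_shuffle_alt (commands : List String) (MOD : Int) : Int × Int :=
  let r := wmsSolve MOD commands
  (PySem.Int.mod r.1 MOD, PySem.Int.mod r.2 MOD)

-- ===== PRECONDITION & SPEC =====
-- Pre_ excludes (a) commands where Python's int() raises ValueError (e.g. "cut x"), and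
-- (b) MOD < 2, where A raises (pow/% with MOD = 0, pow needing an inverse for MOD ≤ 0) or,
-- when it does return, leaves increment/offset only lazily reduced (e.g. increment stays 1
-- instead of 1 % MOD) — an accident of its per-branch reduction that is meaningless for a
-- modulus; B reduces both components at the end.
def Pre_weird_math_shuffle (commands : List String) (MOD : Int) : Prop :=
  2 ≤ MOD ∧ ∀ command ∈ commands,
    (PySem.Str.startswith command "cut" = true →
      (PySem.Int.ofStr? (PySem.Str.slice command (some 4) none)).isSome = true) ∧
    (command ≠ "deal into new stack" → PySem.Str.startswith command "cut" = false →
      PySem.Str.startswith command "deal with increment" = true →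
      (PySem.Int.ofStr? (PySem.Str.slice command (some 20) none)).isSome = true)
instance (commands : List String) (MOD : Int) : Decidable (Pre_weird_math_shuffle commands MOD) := by
  unfold Pre_weird_math_shuffle; infer_instance

def pvWitness_weird_math_shuffle : List String × Int :=
  (["deal into new stack", "cut 6", "deal with increment 7", "cut -4"], 101)

def Spec_weird_math_shuffle (commands : List String) (MOD : Int) (out : Int × Int) : Prop := out = weird_math_shuffle_alt commands MOD
instance (commands : List String) (MOD : Int) (out : Int × Int) : Decidable (Spec_weird_math_shuffle commands MOD out) := by unfold Spec_weird_math_shuffle; infer_instance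

-- ===== CLAIM (what is proved, stated in full; the proofs are below) =====
def Claim_equal_weird_math_shuffle : Prop := ∀ (commands : List String) (MOD : Int), Dom_weird_math_shuffle commands MOD → Pre_weird_math_shuffle commands MOD → Spec_weird_math_shuffle commands MOD (weird_math_shuffle commands MOD)

-- ===== LEMMAS AND PROOFS =====

-- exact (unreduced) affine composition, the reference both sides are congruent to
def wmsEComb (p q : Int × Int) : Int × Int := (p.1 + p.2 * q.1, p.2 * q.2)

def wmsE (MOD : Int) (cmds : List String) : Int × Int :=
  (cmds.map (wmsParse MOD)).foldl wmsEComb (0, 1)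

-- componentwise congruence mod MOD
def wmsPEq (MOD : Int) (p q : Int × Int) : Prop :=
  p.1 ≡ q.1 [ZMOD MOD] ∧ p.2 ≡ q.2 [ZMOD MOD]

-- the loop invariant of A: both components canonically reduced
def wmsInv (MOD : Int) (s : Int × Int) : Prop :=
  0 ≤ s.1 ∧ s.1 < MOD ∧ 0 ≤ s.2 ∧ s.2 < MOD

lemma wms_step_eq (MOD : Int) (h2 : 2 ≤ MOD) (command : String)
    (hok : (PySem.Str.startswith command "cut" = true →
        (PySem.Int.ofStr? (PySem.Str.slice command (some 4) none)).isSome = true) ∧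
      (command ≠ "deal into new stack" → PySem.Str.startswith command "cut" = false →
        PySem.Str.startswith command "deal with increment" = true →
        (PySem.Int.ofStr? (PySem.Str.slice command (some 20) none)).isSome = true))
    (s : Int × Int) (hs : wmsInv MOD s) :
    wmsStepA MOD s command = wmsComb MOD s (wmsParse MOD command) ∧
      wmsInv MOD (wmsStepA MOD s command) := by
  obtain ⟨h1, hlt1, h0, hlt0⟩ := hs
  have hMpos : (0 : Int) < MOD := by omega
  have hmodeq : ∀ a : Int, PySem.Int.mod a MOD = a % MOD :=
    fun a => PySem.Int.mod_eq_emod_of_pos hMpos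
  have hbnd : ∀ a : Int, 0 ≤ PySem.Int.mod a MOD ∧ PySem.Int.mod a MOD < MOD :=
    fun a => ⟨PySem.Int.mod_nonneg a hMpos, PySem.Int.mod_lt a hMpos⟩
  have hself1 : PySem.Int.mod s.1 MOD = s.1 := by
    rw [hmodeq]; exact Int.emod_eq_of_lt h1 hlt1
  have hself2 : PySem.Int.mod s.2 MOD = s.2 := by
    rw [hmodeq]; exact Int.emod_eq_of_lt h0 hlt0
  unfold wmsStepA wmsParse wmsComb wmsInv
  by_cases hds : command == "deal into new stack"
  · simp only [hds, if_true]
    refine ⟨?_, (hbnd _).1, (hbnd _).2, (hbnd _).1, (hbnd _).2⟩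
    have hm1 : s.2 * (-1 : Int) = -s.2 := by ring
    refine Prod.ext ?_ (by rw [hm1])
    show PySem.Int.mod (s.1 + PySem.Int.mod (-s.2) MOD) MOD = PySem.Int.mod (s.1 + s.2 * (-1)) MOD
    rw [hm1]
    simp only [hmodeq]
    rw [Int.add_emod, Int.emod_emod_of_dvd _ (dvd_refl MOD), ← Int.add_emod]
  · simp only [hds, Bool.false_eq_true, if_false]
    by_cases hcut : PySem.Str.startswith command "cut" = true
    · rcases Option.isSome_iff_exists.mp (hok.1 hcut) with ⟨n, hn⟩
      simp only [hcut, if_true, hn]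
      refine ⟨?_, (hbnd _).1, (hbnd _).2, h0, hlt0⟩
      refine Prod.ext rfl ?_
      show s.2 = PySem.Int.mod (s.2 * 1) MOD
      rw [mul_one, hself2]
    · have hcut' : PySem.Str.startswith command "cut" = false := by simpa using hcut
      simp only [hcut', Bool.false_eq_true, if_false]
      by_cases hdwi : PySem.Str.startswith command "deal with increment" = true
      · have hne : command ≠ "deal into new stack" := by
          intro h; subst h; simp at hds
        rcases Option.isSome_iff_exists.mp (hok.2 hne hcut' hdwi) with ⟨n, hn⟩
        simp only [hdwi, if_true, hn]
        refine ⟨?_, h1, hlt1, (hbnd _).1, (hbnd _).2⟩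
        refine Prod.ext ?_ rfl
        show s.1 = PySem.Int.mod (s.1 + s.2 * 0) MOD
        rw [mul_zero, add_zero, hself1]
      · have hdwi' : PySem.Str.startswith command "deal with increment" = false := by
          simpa using hdwi
        simp only [hdwi', Bool.false_eq_true, if_false]
        refine ⟨?_, h1, hlt1, h0, hlt0⟩
        refine Prod.ext ?_ ?_
        · show s.1 = PySem.Int.mod (s.1 + s.2 * 0) MOD
          rw [mul_zero, add_zero, hself1]
        · show s.2 = PySem.Int.mod (s.2 * 1) MOD
          rw [mul_one, hself2]

lemma wms_fold_eq (MOD : Int) (h2 : 2 ≤ MOD) (commands : List String)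
    (hok : ∀ command ∈ commands,
      (PySem.Str.startswith command "cut" = true →
        (PySem.Int.ofStr? (PySem.Str.slice command (some 4) none)).isSome = true) ∧
      (command ≠ "deal into new stack" → PySem.Str.startswith command "cut" = false →
        PySem.Str.startswith command "deal with increment" = true →
        (PySem.Int.ofStr? (PySem.Str.slice command (some 20) none)).isSome = true))
    (s : Int × Int) (hs : wmsInv MOD s) :
    commands.foldl (wmsStepA MOD) s = commands.foldl (fun t c => wmsComb MOD t (wmsParse MOD c)) s ∧
      wmsInv MOD (commands.foldl (wmsStepA MOD) s) := by
  induction commands generalizing s with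
  | nil => exact ⟨rfl, hs⟩
  | cons c cs ih =>
    obtain ⟨heq, hinv⟩ := wms_step_eq MOD h2 c (hok c (List.mem_cons_self)) s hs
    simp only [List.foldl_cons, ← heq]
    exact ih (fun x hx => hok x (List.mem_cons_of_mem _ hx)) _ hinv

-- wmsComb is congruent to the exact composition
lemma wms_comb_cong (MOD : Int) (hM : 0 < MOD) {p p' q q' : Int × Int}
    (hp : wmsPEq MOD p p') (hq : wmsPEq MOD q q') :
    wmsPEq MOD (wmsComb MOD p q) (wmsEComb p' q') := by
  obtain ⟨hp1, hp2⟩ := hp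
  obtain ⟨hq1, hq2⟩ := hq
  unfold wmsComb wmsEComb wmsPEq
  constructor
  · show PySem.Int.mod (p.1 + p.2 * q.1) MOD ≡ p'.1 + p'.2 * q'.1 [ZMOD MOD]
    rw [PySem.Int.mod_eq_emod_of_pos hM]
    exact (Int.emod_emod_of_dvd _ (dvd_refl MOD)).trans ((hp1.add (hp2.mul hq1)))
  · show PySem.Int.mod (p.2 * q.2) MOD ≡ p'.2 * q'.2 [ZMOD MOD]
    rw [PySem.Int.mod_eq_emod_of_pos hM]
    exact (Int.emod_emod_of_dvd _ (dvd_refl MOD)).trans (hp2.mul hq2)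

-- reduced fold of wmsComb is congruent to the exact fold wmsE
lemma wms_fold_cong (MOD : Int) (hM : 0 < MOD) (cmds : List String)
    (s s' : Int × Int) (hs : wmsPEq MOD s s') :
    wmsPEq MOD (cmds.foldl (fun t c => wmsComb MOD t (wmsParse MOD c)) s)
      ((cmds.map (wmsParse MOD)).foldl wmsEComb s') := by
  induction cmds generalizing s s' with
  | nil => exact hs
  | cons c cs ih =>
    simp only [List.foldl_cons, List.map_cons]
    exact ih _ _ (wms_comb_cong MOD hM hs ⟨Int.ModEq.refl _, Int.ModEq.refl _⟩)

lemma wms_ecomb_assoc (p q r : Int × Int) :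
    wmsEComb (wmsEComb p q) r = wmsEComb p (wmsEComb q r) := by
  unfold wmsEComb; exact Prod.ext (by ring) (by ring)

lemma wms_ecomb_id (p : Int × Int) : wmsEComb (0, 1) p = p := by
  unfold wmsEComb; exact Prod.ext (by ring) (by ring)

-- folding from any start equals composing the start with the fold from identity
lemma wms_fold_hom (ps : List (Int × Int)) (s : Int × Int) :
    ps.foldl wmsEComb s = wmsEComb s (ps.foldl wmsEComb (0, 1)) := by
  induction ps generalizing s with
  | nil =>
    simp only [List.foldl_nil]
    exact (Prod.ext (by simp [wmsEComb]) (by simp [wmsEComb])).symm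
  | cons p ps ih =>
    simp only [List.foldl_cons]
    rw [ih (wmsEComb s p), ih (wmsEComb (0, 1) p), wms_ecomb_id, wms_ecomb_assoc]

lemma wms_E_append (MOD : Int) (l r : List String) :
    wmsE MOD (l ++ r) = wmsEComb (wmsE MOD l) (wmsE MOD r) := by
  unfold wmsE
  rw [List.map_append, List.foldl_append, wms_fold_hom]

-- the divide-and-conquer solve is congruent to the exact fold
lemma wms_solveFuel_cong (MOD : Int) (hM : 0 < MOD) :
    ∀ (n : Nat) (cmds : List String), cmds.length ≤ n →
      wmsPEq MOD (wmsSolveFuel MOD n cmds) (wmsE MOD cmds) := by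
  intro n
  induction n with
  | zero =>
    intro cmds hlen
    have : cmds = [] := List.eq_nil_of_length_eq_zero (Nat.le_zero.mp hlen)
    subst this
    exact ⟨Int.ModEq.refl _, Int.ModEq.refl _⟩
  | succ n ih =>
    intro cmds hlen
    match cmds with
    | [] => exact ⟨Int.ModEq.refl _, Int.ModEq.refl _⟩
    | [c] =>
      show wmsPEq MOD (wmsParse MOD c) (wmsE MOD [c])
      unfold wmsE
      simp only [List.map_cons, List.map_nil, List.foldl_cons, List.foldl_nil, wms_ecomb_id]
      exact ⟨Int.ModEq.refl _, Int.ModEq.refl _⟩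
    | a :: b :: t =>
      set cmds' := a :: b :: t with hc
      have hlen2 : 2 ≤ cmds'.length := by rw [hc]; simp
      have htlen : (cmds'.take (cmds'.length / 2)).length ≤ n := by
        simp only [List.length_take]
        have := hlen
        omega
      have hdlen : (cmds'.drop (cmds'.length / 2)).length ≤ n := by
        simp only [List.length_drop]
        have := hlen
        omega
      have hE : wmsE MOD cmds' =
          wmsEComb (wmsE MOD (cmds'.take (cmds'.length / 2)))
            (wmsE MOD (cmds'.drop (cmds'.length / 2))) := by
        conv_lhs => rw [← List.take_append_drop (cmds'.length / 2) cmds']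
        exact wms_E_append MOD _ _
      show wmsPEq MOD (wmsComb MOD (wmsSolveFuel MOD n (cmds'.take (cmds'.length / 2)))
        (wmsSolveFuel MOD n (cmds'.drop (cmds'.length / 2)))) (wmsE MOD cmds')
      rw [hE]
      exact wms_comb_cong MOD hM (ih _ htlen) (ih _ hdlen)

lemma wms_solve_cong (MOD : Int) (hM : 0 < MOD) (cmds : List String) :
    wmsPEq MOD (wmsSolve MOD cmds) (wmsE MOD cmds) :=
  wms_solveFuel_cong MOD hM cmds.length cmds (le_refl _)

-- ===== VERDICT (by name: the statement is the Claim_ definition above) =====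
theorem weird_math_shuffle_spec : Claim_equal_weird_math_shuffle := by
  intro commands MOD _ hpre
  obtain ⟨h2, hok⟩ := hpre
  have hMpos : (0 : Int) < MOD := by omega
  have hinv0 : wmsInv MOD (0, 1) := by unfold wmsInv; refine ⟨by norm_num, by omega, by norm_num, by omega⟩
  obtain ⟨heq, hinv⟩ := wms_fold_eq MOD h2 commands hok (0, 1) hinv0
  obtain ⟨hr1, hr2, hr3, hr4⟩ := hinv
  -- A's result is congruent to the exact fold wmsE …
  have hA : wmsPEq MOD (commands.foldl (wmsStepA MOD) (0, 1)) (wmsE MOD commands) := by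
    rw [heq]
    exact wms_fold_cong MOD hMpos commands (0, 1) (0, 1) ⟨Int.ModEq.refl _, Int.ModEq.refl _⟩
  -- … and so is B's divide-and-conquer result
  have hB : wmsPEq MOD (wmsSolve MOD commands) (wmsE MOD commands) :=
    wms_solve_cong MOD hMpos commands
  show weird_math_shuffle commands MOD = weird_math_shuffle_alt commands MOD
  unfold weird_math_shuffle weird_math_shuffle_alt
  dsimp only
  obtain ⟨hA1, hA2⟩ := hA
  obtain ⟨hB1, hB2⟩ := hB
  simp only [PySem.Int.mod_eq_emod_of_pos hMpos]
  refine Prod.ext ?_ ?_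
  · show (commands.foldl (wmsStepA MOD) (0, 1)).1 = (wmsSolve MOD commands).1 % MOD
    rw [← Int.emod_eq_of_lt hr1 hr2]
    exact hA1.trans hB1.symm
  · show (commands.foldl (wmsStepA MOD) (0, 1)).2 = (wmsSolve MOD commands).2 % MOD
    rw [← Int.emod_eq_of_lt hr3 hr4]
    exact hA2.trans hB2.symm
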